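-- pv_equiv track=rewrite | github.com/MrBrantCode/unitest_baseline | mut_generate/mist_train_cf/cf_49813/solution.py | longest_valley
-- ===== SOURCE A (Python) =====
-- def longest_valley(arr):
--     n = len(arr)
--     down, up, answer = 0, 0, 0
--     for i in range(1, n):
--         if arr[i]<arr[i-1]:
--             if up:
--                 down = 0
--             down += 1
--             up = 0
--         if arr[i]>arr[i-1] and down:
--             up += 1
--         if arr[i]==arr[i-1]:
--             down = up = 0
--         answer = max(answer, down + up + 1)
--     return answer if answer>=3 else 0
-- ===== SOURCE B (Python) =====
-- def longest_valley(arr):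
--     n = len(arr)
--     # ascent run lengths, built right-to-left: after reversing, incs[i] is the
--     # length of the maximal strict ascent starting at index i
--     rev = [0]
--     for i in range(n - 1, 0, -1):
--         rev.append(rev[-1] + 1 if arr[i - 1] < arr[i] else 0)
--     incs = rev
--     incs.reverse()
--     # forward scan: run = current strict-descent run length ending at i
--     best = 0
--     run = 0
--     for i in range(1, n):
--         run = run + 1 if arr[i] < arr[i - 1] else 0
--         if run:
--             best = max(best, run + incs[i] + 1)
--     return best if best >= 3 else 0
-- ===== Notes on version B (the rewrite author's own statement) =====
-- stated objective: alternative
-- what changed: Replaced A's one-pass three-variable state machine (down/up/answer with cross-resetting branches) by a two-pass decomposition: a backward pass tabulating the strict-ascent run length starting at every index, then a forward scan that tracks only the current strict-descent run and combines run + incs[i] + 1.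
import Mathlib
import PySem

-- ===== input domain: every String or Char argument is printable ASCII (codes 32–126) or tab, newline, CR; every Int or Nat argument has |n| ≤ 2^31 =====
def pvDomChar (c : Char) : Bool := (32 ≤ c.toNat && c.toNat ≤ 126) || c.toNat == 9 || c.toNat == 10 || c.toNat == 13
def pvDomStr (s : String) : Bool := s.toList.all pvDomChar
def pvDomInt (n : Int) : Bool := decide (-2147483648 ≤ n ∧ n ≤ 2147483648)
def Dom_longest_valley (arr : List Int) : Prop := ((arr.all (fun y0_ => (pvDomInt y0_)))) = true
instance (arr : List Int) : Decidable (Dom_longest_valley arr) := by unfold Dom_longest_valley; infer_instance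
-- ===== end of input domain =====

-- B replaces A's one-pass three-variable valley state machine by a two-pass scheme
-- (backward ascent-run table, then a forward descent scan); alternative decomposition, same O(n) cost.


-- ===== PORT A =====
def longest_valley (arr : List Int) : Int :=
  let n : Int := (arr.length : Int)
  let st := (PySem.List.pyRange 1 n 1).foldl (fun (st : Int × Int × Int) i =>
    let down := st.1; let up := st.2.1; let answer := st.2.2
    let t1 := if PySem.List.pyGetD arr i 0 < PySem.List.pyGetD arr (i-1) 0 then
        ((if up ≠ 0 then (0:Int) else down) + 1, (0:Int)) else (down, up)
    let t2 := if PySem.List.pyGetD arr i 0 > PySem.List.pyGetD arr (i-1) 0 ∧ t1.1 ≠ 0 then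
        (t1.1, t1.2 + 1) else t1
    let t3 := if PySem.List.pyGetD arr i 0 = PySem.List.pyGetD arr (i-1) 0 then ((0:Int), (0:Int)) else t2
    (t3.1, t3.2, max answer (t3.1 + t3.2 + 1))) ((0:Int), (0:Int), (0:Int))
  if st.2.2 ≥ 3 then st.2.2 else 0

-- ===== PORT B =====
def longest_valley_alt (arr : List Int) : Int :=
  let n : Int := (arr.length : Int)
  let rev := (PySem.List.pyRange (n-1) 0 (-1)).foldl (fun acc i =>
      acc ++ [if PySem.List.pyGetD arr (i-1) 0 < PySem.List.pyGetD arr i 0 then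
                PySem.List.pyGetD acc (-1) 0 + 1 else 0]) [(0:Int)]
  let incs := rev.reverse
  let bs := (PySem.List.pyRange 1 n 1).foldl (fun (st : Int × Int) i =>
      let run := if PySem.List.pyGetD arr i 0 < PySem.List.pyGetD arr (i-1) 0 then st.2 + 1 else 0
      let best := if run ≠ 0 then max st.1 (run + PySem.List.pyGetD incs i 0 + 1) else st.1
      (best, run)) ((0:Int), (0:Int))
  if bs.1 ≥ 3 then bs.1 else 0

-- ===== PRECONDITION & SPEC =====
def Spec_longest_valley (arr : List Int) (out : Int) : Prop := out = longest_valley_alt arr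
instance (arr : List Int) (out : Int) : Decidable (Spec_longest_valley arr out) := by unfold Spec_longest_valley; infer_instance

-- ===== CLAIM (what is proved, stated in full; the proofs are below) =====
def Claim_equal_longest_valley : Prop := ∀ (arr : List Int), Dom_longest_valley arr → Spec_longest_valley arr (longest_valley arr)

-- ===== LEMMAS AND PROOFS =====

-- A's per-step state update on (down, up), as a function of previous element p and current x
def lvDU (d u p x : Int) : Int × Int :=
  let t1 := if x < p then ((if u ≠ 0 then (0:Int) else d) + 1, (0:Int)) else (d, u)
  let t2 := if x > p ∧ t1.1 ≠ 0 then (t1.1, t1.2 + 1) else t1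
  if x = p then ((0:Int), (0:Int)) else t2

-- A's full per-step state update including the running maximum
def lvStepA (st : Int × Int × Int) (p x : Int) : Int × Int × Int :=
  ((lvDU st.1 st.2.1 p x).1, (lvDU st.1 st.2.1 p x).2,
    max st.2.2 ((lvDU st.1 st.2.1 p x).1 + (lvDU st.1 st.2.1 p x).2 + 1))

-- maximum of A's future step values from state (d, u) after previous element p
def lvR (d u p : Int) : List Int → Int
  | [] => 0
  | x :: xs => max ((lvDU d u p x).1 + (lvDU d u p x).2 + 1) (lvR (lvDU d u p x).1 (lvDU d u p x).2 x xs)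

-- length of the maximal strict ascent starting right after p
def lvClimb (p : Int) : List Int → Int
  | [] => 0
  | x :: xs => if p < x then lvClimb x xs + 1 else 0

-- best valley value over xs, given a current descent run of length s ending at p
def lvBest (s p : Int) : List Int → Int
  | [] => 0
  | x :: xs => if x < p then max (s + 1 + lvClimb x xs + 1) (lvBest (s + 1) x xs) else lvBest 0 x xs

-- the incs table of B, structurally: ascent lengths for p :: xs, front first
def lvIncL (p : Int) : List Int → List Int
  | [] => [0]
  | y :: ys => (if p < y then lvClimb y ys + 1 else 0) :: lvIncL y ys

def lvUTail : List Int → List Int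
  | [] => []
  | y :: ys => lvIncL y ys

-- fold over consecutive pairs of p :: xs, left to right
def lvPairFoldl {σ : Type} (f : σ → Int → Int → σ) (p : Int) (xs : List Int) (init : σ) : σ :=
  match xs with
  | [] => init
  | y :: ys => lvPairFoldl f y ys (f init p y)

-- fold over consecutive pairs of p :: xs, right to left
def lvPairFoldr {σ : Type} (g : σ → Int → Int → σ) (p : Int) (xs : List Int) (init : σ) : σ :=
  match xs with
  | [] => init
  | y :: ys => g (lvPairFoldr g y ys init) p y

-- fold over consecutive pairs of p :: xs zipped with a companion list, left to right
def lvTriFoldl {σ : Type} (f : σ → Int → Int → Int → σ) (p : Int) (l : List (Int × Int)) (init : σ) : σ :=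
  match l with
  | [] => init
  | (y, u) :: t => lvTriFoldl f y t (f init p y u)

theorem lv_range_foldl_pair {σ : Type} (f : σ → Int → Int → σ) :
    ∀ (xs : List Int) (x : Int) (init : σ),
      (List.range xs.length).foldl (fun s k => f s ((x :: xs).getD k 0) (xs.getD k 0)) init
        = lvPairFoldl f x xs init := by
  intro xs
  induction xs with
  | nil => intro x init; simp [lvPairFoldl]
  | cons y ys ih =>
    intro x init
    rw [List.length_cons, List.range_succ_eq_map, List.foldl_cons, List.foldl_map]
    simp only [List.getD_cons_zero]
    have h : (fun (s : σ) (k : Nat) => f s ((x :: y :: ys).getD (Nat.succ k) 0) ((y :: ys).getD (Nat.succ k) 0))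
        = (fun s k => f s ((y :: ys).getD k 0) (ys.getD k 0)) := by
      funext s k; simp
    rw [h, ih y (f init x y)]
    rfl

theorem lv_range_foldr_pair {σ : Type} (g : σ → Int → Int → σ) :
    ∀ (xs : List Int) (x : Int) (init : σ),
      (List.range xs.length).foldr (fun k s => g s ((x :: xs).getD k 0) (xs.getD k 0)) init
        = lvPairFoldr g x xs init := by
  intro xs
  induction xs with
  | nil => intro x init; simp [lvPairFoldr]
  | cons y ys ih =>
    intro x init
    rw [List.length_cons, List.range_succ_eq_map, List.foldr_cons, List.foldr_map]
    simp only [List.getD_cons_zero]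
    have h : (fun (k : Nat) (s : σ) => g s ((x :: y :: ys).getD (Nat.succ k) 0) ((y :: ys).getD (Nat.succ k) 0))
        = (fun k s => g s ((y :: ys).getD k 0) (ys.getD k 0)) := by
      funext k s; simp
    rw [h, ih y init]
    rfl

theorem lv_range_foldl_tri {σ : Type} (f : σ → Int → Int → Int → σ) :
    ∀ (xs us : List Int) (x : Int) (init : σ), xs.length = us.length →
      (List.range xs.length).foldl (fun s k => f s ((x :: xs).getD k 0) (xs.getD k 0) (us.getD k 0)) init
        = lvTriFoldl f x (xs.zip us) init := by
  intro xs
  induction xs with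
  | nil => intro us x init _; simp [lvTriFoldl]
  | cons y ys ih =>
    intro us x init hlen
    cases us with
    | nil => simp at hlen
    | cons u ut =>
      rw [List.length_cons, List.range_succ_eq_map, List.foldl_cons, List.foldl_map]
      simp only [List.getD_cons_zero]
      have h : (fun (s : σ) (k : Nat) => f s ((x :: y :: ys).getD (Nat.succ k) 0) ((y :: ys).getD (Nat.succ k) 0) ((u :: ut).getD (Nat.succ k) 0))
          = (fun s k => f s ((y :: ys).getD k 0) (ys.getD k 0) (ut.getD k 0)) := by
        funext s k; simp
      rw [h, ih ut y (f init x y u) (by simpa using hlen)]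
      rfl


theorem lvDU_nonneg (d u p x : Int) (hd : 0 ≤ d) (hu : 0 ≤ u) :
    0 ≤ (lvDU d u p x).1 ∧ 0 ≤ (lvDU d u p x).2 := by
  unfold lvDU
  by_cases h1 : x < p <;> by_cases h2 : x = p
  all_goals simp [h1, h2]
  all_goals split_ifs <;> simp_all <;> omega

theorem lv_pairFoldl_answer :
    ∀ (xs : List Int) (p d u a : Int), 0 ≤ d → 0 ≤ u →
      (lvPairFoldl lvStepA p xs (d, u, a)).2.2 = if xs = [] then a else max a (lvR d u p xs) := by
  intro xs
  induction xs with
  | nil => intro p d u a _ _; simp [lvPairFoldl]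
  | cons x rest ih =>
    intro p d u a hd hu
    have hinv := lvDU_nonneg d u p x hd hu
    simp only [lvPairFoldl, lvStepA]
    rw [ih x (lvDU d u p x).1 (lvDU d u p x).2 _ hinv.1 hinv.2]
    by_cases hrest : rest = []
    · subst hrest
      simp only [lvR, if_neg (List.cons_ne_nil x []), reduceIte]
      omega
    · simp only [if_neg hrest, if_neg (List.cons_ne_nil x rest), lvR]
      omega

theorem lvClimb_nonneg : ∀ (xs : List Int) (p : Int), 0 ≤ lvClimb p xs := by
  intro xs
  induction xs with
  | nil => intro p; simp [lvClimb]
  | cons y ys ih =>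
    intro p
    simp only [lvClimb]
    split_ifs with h
    · have := ih y; omega
    · simp

theorem lvBest_zero_or_ge : ∀ (xs : List Int) (s p : Int), 0 ≤ s →
    lvBest s p xs = 0 ∨ 2 ≤ lvBest s p xs := by
  intro xs
  induction xs with
  | nil => intro s p _; simp [lvBest]
  | cons x rest ih =>
    intro s p hs
    simp only [lvBest]
    split_ifs with h
    · have hc := lvClimb_nonneg rest x
      have := ih (s + 1) x (by omega)
      right; omega
    · exact ih 0 x le_rfl

theorem lvR_eq_best : ∀ (xs : List Int) (p d u : Int), 0 ≤ d → 0 ≤ u → (u ≠ 0 → 0 < d) → xs ≠ [] →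
    lvR d u p xs = max 1 (max (if 0 < d ∧ 0 < lvClimb p xs then d + u + lvClimb p xs + 1 else 0)
      (lvBest (if u = 0 then d else 0) p xs)) := by
  intro xs
  induction xs with
  | nil => intro p d u _ _ _ h; exact absurd rfl h
  | cons x rest ih =>
    intro p d u hd hu hud _
    have hC := lvClimb_nonneg rest x
    rcases lt_trichotomy x p with h | h | h
    · -- descent step
      have h2 : x ≠ p := ne_of_lt h
      have h3 : ¬ x > p := by omega
      have hDU : lvDU d u p x = ((if u ≠ 0 then 0 else d) + 1, 0) := by
        simp [lvDU, h, h2, h3]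
      have hd' : 0 < (if u ≠ 0 then (0:Int) else d) + 1 := by split_ifs <;> omega
      by_cases hrest : rest = []
      · subst hrest
        simp only [lvR, hDU, lvClimb, lvBest, if_pos h, if_neg h3]
        by_cases hu0 : u = 0 <;> simp [hu0]
        all_goals omega
      · simp only [lvR, hDU]
        rw [ih x _ 0 (by omega) le_rfl (by simp) hrest]
        simp only [reduceIte]
        -- rhs
        simp only [lvClimb, if_neg h3, lvBest, if_pos h]
        by_cases hu0 : u = 0 <;> by_cases hc : 0 < lvClimb x rest <;>
          simp [hu0, hc] <;> omega
    · -- equal step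
      subst h
      have hDU : lvDU d u x x = (0, 0) := by simp [lvDU]
      by_cases hrest : rest = []
      · subst hrest
        simp [lvR, hDU, lvClimb, lvBest]
      · simp only [lvR, hDU]
        rw [ih x 0 0 le_rfl le_rfl (by simp) hrest]
        simp only [lvClimb, lt_irrefl, lvBest]
        simp
    · -- ascent step
      have h2 : x ≠ p := (ne_of_lt h).symm
      have h3 : ¬ x < p := by omega
      by_cases hd0 : d = 0
      · have hu0 : u = 0 := by by_contra hne; exact absurd (hud hne) (by omega)
        subst hd0; subst hu0
        have hDU : lvDU 0 0 p x = (0, 0) := by simp [lvDU, h2, h3]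
        by_cases hrest : rest = []
        · subst hrest; simp [lvR, hDU, lvClimb, lvBest, h, h3]
        · simp only [lvR, hDU]
          rw [ih x 0 0 le_rfl le_rfl (by simp) hrest]
          simp only [lvBest, if_neg h3]
          simp
      · have hDU : lvDU d u p x = (d, u + 1) := by
          simp [lvDU, h2, h3, h, hd0]
        by_cases hrest : rest = []
        · subst hrest
          simp only [lvR, hDU, lvClimb, lvBest, if_pos h, if_neg h3]
          simp
          split_ifs <;> omega
        · simp only [lvR, hDU]
          rw [ih x d (u+1) hd (by omega) (fun _ => by omega) hrest]
          simp only [lvClimb, if_pos h, lvBest, if_neg h3]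
          have hu1 : ¬ (u + 1 = 0) := by omega
          by_cases hc : 0 < lvClimb x rest <;>
            simp [hu1, hc, lt_of_le_of_ne hd (Ne.symm hd0)] <;> split_ifs <;> omega

theorem lvIncL_cons (p : Int) (xs : List Int) : lvIncL p xs = lvClimb p xs :: lvUTail xs := by
  cases xs <;> simp [lvIncL, lvClimb, lvUTail]

theorem lvIncL_length : ∀ (xs : List Int) (p : Int), (lvIncL p xs).length = xs.length + 1 := by
  intro xs
  induction xs with
  | nil => intro p; rfl
  | cons y ys ih => intro p; simp only [lvIncL, List.length_cons, ih y]

theorem lvUTail_length (xs : List Int) : (lvUTail xs).length = xs.length := by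
  cases xs with
  | nil => rfl
  | cons y ys => simp only [lvUTail, lvIncL_length, List.length_cons]

theorem lv_pairFoldr_incs :
    ∀ (xs : List Int) (x : Int),
      lvPairFoldr (fun acc p y => acc ++ [if p < y then PySem.List.pyGetD acc (-1) 0 + 1 else 0]) x xs [0]
        = (lvIncL x xs).reverse := by
  intro xs
  induction xs with
  | nil => intro x; rfl
  | cons y ys ih =>
    intro x
    simp only [lvPairFoldr]
    rw [ih y, lvIncL_cons y ys, List.reverse_cons, PySem.List.pyGetD_neg_one_append_singleton,
      show lvIncL x (y :: ys) = (if x < y then lvClimb y ys + 1 else 0) :: lvIncL y ys from rfl,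
      lvIncL_cons y ys, List.reverse_cons, List.reverse_cons]

-- B's per-step update of (best, run), given previous element p, current y, ascent length u at y
def lvStepB (st : Int × Int) (p y u : Int) : Int × Int :=
  let run := if y < p then st.2 + 1 else 0
  (if run ≠ 0 then max st.1 (run + u + 1) else st.1, run)

theorem lv_triFoldl_best :
    ∀ (xs : List Int) (p best s : Int), 0 ≤ best → 0 ≤ s →
      (lvTriFoldl lvStepB p (xs.zip (lvUTail xs)) (best, s)).1 = max best (lvBest s p xs) := by
  intro xs
  induction xs with
  | nil => intro p best s hb _; simp [lvTriFoldl, lvBest]; omega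
  | cons y ys ih =>
    intro p best s hb hs
    rw [show lvUTail (y :: ys) = lvIncL y ys from rfl, lvIncL_cons y ys]
    simp only [List.zip_cons_cons, lvTriFoldl]
    by_cases hy : y < p
    · have hs1 : s + 1 ≠ 0 := by omega
      simp only [lvStepB, if_pos hy, hs1, if_true, ne_eq, not_false_eq_true]
      rw [ih y _ (s + 1) (by omega) (by omega)]
      simp only [lvBest, if_pos hy]
      omega
    · simp only [lvStepB, if_neg hy, ne_eq, not_true_eq_false, if_false]
      rw [ih y best 0 hb le_rfl]
      simp only [lvBest, if_neg hy]

theorem lv_portA_eq (x : Int) (xs : List Int) :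
    longest_valley (x :: xs)
      = (if (lvPairFoldl lvStepA x xs ((0:Int), (0:Int), (0:Int))).2.2 ≥ 3
          then (lvPairFoldl lvStepA x xs ((0:Int), (0:Int), (0:Int))).2.2 else 0) := by
  simp only [longest_valley]
  rw [PySem.List.pyRange_one,
    show (((x :: xs).length : Int) - 1).toNat = xs.length by simp,
    List.foldl_map]
  have hfun : (fun (st : Int × Int × Int) (k : Nat) =>
      (fun (st : Int × Int × Int) (i : Int) =>
        let down := st.1; let up := st.2.1; let answer := st.2.2
        let t1 := if PySem.List.pyGetD (x :: xs) i 0 < PySem.List.pyGetD (x :: xs) (i-1) 0 then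
            ((if up ≠ 0 then (0:Int) else down) + 1, (0:Int)) else (down, up)
        let t2 := if PySem.List.pyGetD (x :: xs) i 0 > PySem.List.pyGetD (x :: xs) (i-1) 0 ∧ t1.1 ≠ 0 then
            (t1.1, t1.2 + 1) else t1
        let t3 := if PySem.List.pyGetD (x :: xs) i 0 = PySem.List.pyGetD (x :: xs) (i-1) 0 then ((0:Int), (0:Int)) else t2
        (t3.1, t3.2, max answer (t3.1 + t3.2 + 1))) st (1 + (k : Int)))
      = (fun st k => lvStepA st ((x :: xs).getD k 0) (xs.getD k 0)) := by
    funext st k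
    dsimp only
    rw [show (1 : Int) + (k : Int) - 1 = ((k : Nat) : Int) by omega,
      show (1 : Int) + (k : Int) = (((k + 1 : Nat)) : Int) by push_cast; ring]
    simp only [PySem.List.pyGetD_natCast, List.getD_cons_succ]
    rfl
  rw [hfun, lv_range_foldl_pair lvStepA]

theorem lv_portB_eq (x : Int) (xs : List Int) :
    longest_valley_alt (x :: xs)
      = (if max 0 (lvBest 0 x xs) ≥ 3 then max 0 (lvBest 0 x xs) else 0) := by
  simp only [longest_valley_alt]
  have hrev : (PySem.List.pyRange (((x :: xs).length : Int) - 1) 0 (-1)).foldl (fun acc i =>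
      acc ++ [if PySem.List.pyGetD (x :: xs) (i-1) 0 < PySem.List.pyGetD (x :: xs) i 0 then
                PySem.List.pyGetD acc (-1) 0 + 1 else 0]) [(0:Int)]
      = (lvIncL x xs).reverse := by
    rw [show (((x :: xs).length : Int) - 1) = ((x :: xs).length : Int) - 1 + 1 - 1 by ring]
    rw [PySem.List.pyRange_neg_one_eq_reverse, List.foldl_reverse]
    rw [show ((x :: xs).length : Int) - 1 + 1 - 1 + 1 = ((x :: xs).length : Int) by ring]
    rw [show (0 : Int) + 1 = 1 by ring]
    rw [PySem.List.pyRange_one,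
      show (((x :: xs).length : Int) - 1).toNat = xs.length by simp,
      List.foldr_map]
    have hfun : (fun (k : Nat) (acc : List Int) =>
        acc ++ [if PySem.List.pyGetD (x :: xs) (1 + (k : Int) - 1) 0 < PySem.List.pyGetD (x :: xs) (1 + (k : Int)) 0 then
                PySem.List.pyGetD acc (-1) 0 + 1 else 0])
        = (fun k acc => (fun (acc : List Int) (p y : Int) =>
            acc ++ [if p < y then PySem.List.pyGetD acc (-1) 0 + 1 else 0]) acc ((x :: xs).getD k 0) (xs.getD k 0)) := by
      funext k acc
      dsimp only
      rw [show (1 : Int) + (k : Int) - 1 = ((k : Nat) : Int) by omega,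
        show (1 : Int) + (k : Int) = (((k + 1 : Nat)) : Int) by push_cast; ring]
      simp only [PySem.List.pyGetD_natCast, List.getD_cons_succ]
    rw [hfun, lv_range_foldr_pair (fun (acc : List Int) (p y : Int) =>
      acc ++ [if p < y then PySem.List.pyGetD acc (-1) 0 + 1 else 0]), lv_pairFoldr_incs]
  rw [hrev, List.reverse_reverse]
  rw [PySem.List.pyRange_one,
    show (((x :: xs).length : Int) - 1).toNat = xs.length by simp,
    List.foldl_map]
  have hfun2 : (fun (st : Int × Int) (k : Nat) =>
      (fun (st : Int × Int) (i : Int) =>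
        let run := if PySem.List.pyGetD (x :: xs) i 0 < PySem.List.pyGetD (x :: xs) (i-1) 0 then st.2 + 1 else 0
        let best := if run ≠ 0 then max st.1 (run + PySem.List.pyGetD (lvIncL x xs) i 0 + 1) else st.1
        (best, run)) st (1 + (k : Int)))
      = (fun st k => lvStepB st ((x :: xs).getD k 0) (xs.getD k 0) ((lvUTail xs).getD k 0)) := by
    funext st k
    dsimp only
    rw [show (1 : Int) + (k : Int) - 1 = ((k : Nat) : Int) by omega,
      show (1 : Int) + (k : Int) = (((k + 1 : Nat)) : Int) by push_cast; ring]
    simp only [PySem.List.pyGetD_natCast, lvIncL_cons x xs, List.getD_cons_succ]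
    rfl
  rw [hfun2, lv_range_foldl_tri lvStepB xs (lvUTail xs) x ((0:Int), (0:Int)) (lvUTail_length xs).symm]
  rw [lv_triFoldl_best xs x 0 0 le_rfl le_rfl]

theorem lv_eq (arr : List Int) : longest_valley arr = longest_valley_alt arr := by
  cases arr with
  | nil => rfl
  | cons x xs =>
    rw [lv_portA_eq, lv_portB_eq,
      lv_pairFoldl_answer xs x 0 0 0 le_rfl le_rfl]
    by_cases hxs : xs = []
    · subst hxs; simp [lvBest]
    · rw [if_neg hxs, lvR_eq_best xs x 0 0 le_rfl le_rfl (by simp) hxs]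
      simp only [lt_irrefl, false_and, if_false, reduceIte]
      have hB := lvBest_zero_or_ge xs 0 x le_rfl
      split_ifs <;> omega

-- ===== VERDICT =====
theorem longest_valley_spec : Claim_equal_longest_valley := by
  intro arr _
  unfold Spec_longest_valley
  exact lv_eq arr
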